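-- pv_equiv track=rewrite | github.com/ho94949/bms-archive | server-script/loadbms.py | GuessKey
-- ===== SOURCE A (Python) =====
-- def GuessKey(keyList):
--
--     def RemoveImplicitSubtitle(title):
--         if title == '':
--             return title
--         sublist = ['--', '～～', '()', '[]', '<>', '""']
--
--         for s, e in sublist:
--             if title[-1] == e:
--                 ind = title[:-1].rfind(s)
--                 if ind == -1:
--                     return title.strip()
--                 else:
--                     return title[:ind].strip()
--
--         return title.strip()
--
--     keyList = list(map(RemoveImplicitSubtitle, keyList))
--
--     keyList.sort(key=len)
--
--     if(all(x.startswith(keyList[0]) for x in keyList)):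
--         return keyList[0]
--
--     return "N/A_" + keyList[0]
-- ===== SOURCE B (Python) =====
-- def GuessKey(keyList):
--     # closing-char -> opening-char table instead of a pair loop; one pass
--     # (longest-common-prefix shrink + first-shortest scan) instead of sorting.
--     _OPEN = {'-': '-', '\uff5e': '\uff5e', ')': '(', ']': '[', '>': '<', '"': '"'}
--
--     def Strip(title):
--         if title == '':
--             return title
--         s = _OPEN.get(title[-1])
--         if s is None:
--             return title.strip()
--         ind = title[:-1].rfind(s)
--         if ind == -1:
--             return title.strip()
--         return title[:ind].strip()
--
--     keys = [Strip(t) for t in keyList]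
--     prefix = shortest = keys[0]
--     for k in keys[1:]:
--         while not k.startswith(prefix):
--             prefix = prefix[:-1]
--         if len(k) < len(shortest):
--             shortest = k
--     if shortest == prefix:
--         return shortest
--     return "N/A_" + shortest
-- ===== Notes on version B (the rewrite author's own statement) =====
-- stated objective: faster
-- what changed: B replaces A's closer/opener pair loop by a dict lookup and replaces the sort-by-length plus all(startswith) passes by a single pass that shrinks a longest-common-prefix and tracks the first shortest stripped key, returning the shortest key or 'N/A_'+shortest.
-- outside the precondition, e.g. on GuessKey([]): A raises IndexError, B raises IndexError
import Mathlib
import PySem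

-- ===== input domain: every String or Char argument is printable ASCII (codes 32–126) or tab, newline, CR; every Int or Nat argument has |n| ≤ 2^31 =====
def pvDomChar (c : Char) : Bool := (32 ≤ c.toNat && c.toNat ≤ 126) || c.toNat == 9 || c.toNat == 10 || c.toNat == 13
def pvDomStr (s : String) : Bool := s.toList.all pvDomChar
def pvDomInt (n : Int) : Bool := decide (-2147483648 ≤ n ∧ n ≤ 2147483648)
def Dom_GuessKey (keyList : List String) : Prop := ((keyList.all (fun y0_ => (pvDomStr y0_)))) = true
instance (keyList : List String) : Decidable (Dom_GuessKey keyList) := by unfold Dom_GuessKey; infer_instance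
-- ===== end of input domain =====

-- B replaces A's sort-by-length + all()-startswith passes by a closer→opener table and one
-- pass that shrinks a longest common prefix while tracking the first shortest key (objective:
-- faster, measured).

-- ===== PORT A =====
-- for s, e in sublist: each 2-character string unpacks to the pair (s, e)
def pvSublistA : List (Char × Char) :=
  [('-', '-'), ('～', '～'), ('(', ')'), ('[', ']'), ('<', '>'), ('"', '"')]

-- the 'for s, e in sublist' loop body of RemoveImplicitSubtitle
def pvRemoveLoopA (title : String) : List (Char × Char) → String
  | [] => PySem.Str.strip title
  | (s, e) :: rest =>
    if PySem.Str.pyGet? title (-1) = some e then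
      let ind := PySem.Str.rfind (PySem.Str.slice title none (some (-1))) (String.ofList [s])
      if ind = -1 then PySem.Str.strip title
      else PySem.Str.strip (PySem.Str.slice title none (some ind))
    else pvRemoveLoopA title rest

def pvRemoveImplicitSubtitle (title : String) : String :=
  if title = "" then title
  else pvRemoveLoopA title pvSublistA

def GuessKey (keyList : List String) : String :=
  let ks := keyList.map pvRemoveImplicitSubtitle
  let ks := PySem.List.sorted ks (fun x => PySem.Str.len x) false
  match PySem.List.pyGet? ks 0 with
  | none => ""      -- Python raises IndexError here (empty list); excluded by Pre_
  | some k0 =>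
    if ks.all (fun x => PySem.Str.startswith x k0) then k0
    else "N/A_" ++ k0

-- ===== PORT B =====
-- closing character -> opening character (Source B's _OPEN dict)
def pvOpenB : PySem.Dict Char Char :=
  PySem.Dict.ofList [('-', '-'), ('～', '～'), (')', '('), (']', '['), ('>', '<'), ('"', '"')]

def pvStripB (title : String) : String :=
  if title = "" then title
  else
    match PySem.Str.pyGet? title (-1) with
    | none => title   -- unreachable: title ≠ ''
    | some c =>
      match pvOpenB.get? c with
      | none => PySem.Str.strip title
      | some s =>
        let ind := PySem.Str.rfind (PySem.Str.slice title none (some (-1))) (String.ofList [s])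
        if ind = -1 then PySem.Str.strip title
        else PySem.Str.strip (PySem.Str.slice title none (some ind))

-- the 'while not k.startswith(prefix): prefix = prefix[:-1]' loop
def pvShrink (p k : String) : String :=
  if h : PySem.Str.startswith k p = true then p
  else pvShrink (PySem.Str.slice p none (some (-1))) k
termination_by p.toList.length
decreasing_by
  rw [PySem.Str.slice_to_neg_one]
  have hne : p.toList ≠ [] := by
    intro hn
    apply h
    simp only [PySem.Str.startswith_eq]
    rw [PySem.Chars.startswith_iff, hn]
    exact List.nil_prefix
  cases hp : p.toList with
  | nil => exact absurd hp hne
  | cons a as => simp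

def GuessKey_alt (keyList : List String) : String :=
  let keys := keyList.map pvStripB
  match keys with
  | [] => ""        -- Python raises IndexError here (empty list); excluded by Pre_
  | k0 :: rest =>
    let pm := rest.foldl
      (fun (pm : String × String) k =>
        (pvShrink pm.1 k, if PySem.Str.len k < PySem.Str.len pm.2 then k else pm.2))
      (k0, k0)
    if pm.2 = pm.1 then pm.2 else "N/A_" ++ pm.2

-- ===== PRECONDITION & SPEC =====
-- Pre_ excludes only the empty list, on which A raises IndexError (keyList[0]).
def Pre_GuessKey (keyList : List String) : Prop := keyList ≠ []
instance (keyList : List String) : Decidable (Pre_GuessKey keyList) := by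
  unfold Pre_GuessKey; infer_instance

def pvWitness_GuessKey : List String := ["song (sub)", "song"]

def Spec_GuessKey (keyList : List String) (out : String) : Prop := out = GuessKey_alt keyList
instance (keyList : List String) (out : String) : Decidable (Spec_GuessKey keyList out) := by
  unfold Spec_GuessKey; infer_instance

-- ===== CLAIM (what is proved, stated in full; the proofs are below) =====
def Claim_equal_GuessKey : Prop :=
  ∀ (keyList : List String), Dom_GuessKey keyList → Pre_GuessKey keyList →
    Spec_GuessKey keyList (GuessKey keyList)

-- ===== LEMMAS AND PROOFS =====

theorem pvOpenB_eq : pvOpenB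
    = PySem.Dict.mk [('-', '-'), ('～', '～'), (')', '('), (']', '['), ('>', '<'), ('"', '"')] := by
  decide

-- the two subtitle strippers agree on every title
theorem strip_eq (t : String) : pvRemoveImplicitSubtitle t = pvStripB t := by
  unfold pvRemoveImplicitSubtitle pvStripB
  by_cases ht : t = ""
  · simp [ht]
  · have hne : t.toList ≠ [] := fun hn => ht (String.toList_inj.mp (by simpa using hn))
    cases hcl : t.toList.getLast? with
    | none => exact absurd (List.getLast?_eq_none_iff.mp hcl) hne
    | some c =>
      have hstr : PySem.Str.pyGet? t (-1) = some c := by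
        simp [PySem.List.pyGet?_neg_one, hcl]
      simp only [ht, if_false, hstr]
      simp only [pvRemoveLoopA, pvSublistA, hstr, Option.some.injEq]
      by_cases h1 : c = '-'
      · subst h1; simp [pvOpenB_eq, PySem.Dict.get?]
      by_cases h2 : c = '～'
      · subst h2; simp [pvOpenB_eq, PySem.Dict.get?, h1]
      by_cases h3 : c = ')'
      · subst h3; simp [pvOpenB_eq, PySem.Dict.get?, h1, h2]
      by_cases h4 : c = ']'
      · subst h4; simp [pvOpenB_eq, PySem.Dict.get?, h1, h2, h3]
      by_cases h5 : c = '>'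
      · subst h5; simp [pvOpenB_eq, PySem.Dict.get?, h1, h2, h3, h4]
      by_cases h6 : c = '"'
      · subst h6; simp [pvOpenB_eq, PySem.Dict.get?, h1, h2, h3, h4, h5]
      · simp [pvOpenB_eq, PySem.Dict.get?, h1, h2, h3, h4, h5, h6,
          Ne.symm h1, Ne.symm h2, Ne.symm h3, Ne.symm h4, Ne.symm h5, Ne.symm h6]

theorem insertBy_ne_nil {α : Type} (bef : α → α → Bool) (y : α) (acc : List α) :
    PySem.List.insertBy bef y acc ≠ [] := by
  cases acc with
  | nil => simp [PySem.List.insertBy]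
  | cons a as => simp only [PySem.List.insertBy]; split <;> simp

theorem headI_insertBy {α : Type} [Inhabited α] (bef : α → α → Bool) (y a : α) (as : List α) :
    (PySem.List.insertBy bef y (a :: as)).headI = if bef y a then y else a := by
  simp only [PySem.List.insertBy]; split <;> simp

-- head of insertion sort = left fold keeping the first strictly-smaller element
theorem headI_foldl_insertBy {α : Type} [Inhabited α] (bef : α → α → Bool)
    (xs : List α) (acc : List α) (h : acc ≠ []) :
    (xs.foldl (fun acc y => PySem.List.insertBy bef y acc) acc).headI
      = xs.foldl (fun m y => if bef y m then y else m) acc.headI := by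
  induction xs generalizing acc with
  | nil => rfl
  | cons x xs ih =>
    cases acc with
    | nil => exact absurd rfl h
    | cons a as =>
      rw [List.foldl_cons, List.foldl_cons, ih _ (insertBy_ne_nil bef x (a :: as)),
        headI_insertBy]
      simp

theorem minfold_mem (xs : List String) (m0 : String) :
    xs.foldl (fun m k => if PySem.Str.len k < PySem.Str.len m then k else m) m0 = m0
    ∨ xs.foldl (fun m k => if PySem.Str.len k < PySem.Str.len m then k else m) m0 ∈ xs := by
  induction xs generalizing m0 with
  | nil => exact Or.inl rfl
  | cons x xs ih =>
    rw [List.foldl_cons]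
    rcases ih (if PySem.Str.len x < PySem.Str.len m0 then x else m0) with h | h
    · rw [h]; split
      · exact Or.inr (by simp)
      · exact Or.inl rfl
    · exact Or.inr (List.mem_cons_of_mem _ h)

theorem shrink_spec (p k : String) :
    (pvShrink p k).toList <+: p.toList ∧ (pvShrink p k).toList <+: k.toList
    ∧ ∀ q : List Char, q <+: p.toList → q <+: k.toList → q <+: (pvShrink p k).toList := by
  generalize hgen : p.toList.length = n
  induction n using Nat.strong_induction_on generalizing p with
  | _ n ih =>
    rw [pvShrink.eq_def]
    by_cases h : PySem.Str.startswith k p = true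
    · rw [dif_pos h]
      have hpk : p.toList <+: k.toList := by
        simpa [PySem.Chars.startswith_iff] using h
      exact ⟨List.prefix_refl _, hpk, fun q hq _ => hq⟩
    · rw [dif_neg h]
      have hdl : (PySem.Str.slice p none (some (-1))).toList = p.toList.dropLast :=
        PySem.Str.slice_to_neg_one p
      have hnpk : ¬ p.toList <+: k.toList := by
        intro hc; exact h (by simpa [PySem.Chars.startswith_iff] using hc)
      have hne : p.toList ≠ [] := by
        intro hn; exact hnpk (hn ▸ List.nil_prefix)
      have hlen : (PySem.Str.slice p none (some (-1))).toList.length < n := by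
        rw [hdl, List.length_dropLast]
        have : 0 < p.toList.length := List.length_pos_iff.mpr hne
        omega
      obtain ⟨iha, ihb, ihc⟩ := ih _ hlen _ rfl
      refine ⟨iha.trans (by rw [hdl]; exact List.dropLast_prefix _), ihb, ?_⟩
      intro q hqp hqk
      have hqne : q ≠ p.toList := fun he => hnpk (he ▸ hqk)
      have hlt : q.length < p.toList.length := by
        rcases lt_or_eq_of_le hqp.length_le with h' | h'
        · exact h'
        · exact absurd (hqp.eq_of_length h') hqne
      have hq' : q <+: p.toList.dropLast := by
        rw [List.dropLast_eq_take]
        exact List.prefix_take_iff.mpr ⟨hqp, by omega⟩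
      exact ihc q (by rw [hdl]; exact hq') hqk

theorem shrinkfold_spec (xs : List String) (p0 : String) :
    (xs.foldl (fun p k => pvShrink p k) p0).toList <+: p0.toList
    ∧ (∀ k ∈ xs, (xs.foldl (fun p k => pvShrink p k) p0).toList <+: k.toList)
    ∧ ∀ q : List Char, q <+: p0.toList → (∀ k ∈ xs, q <+: k.toList) →
        q <+: (xs.foldl (fun p k => pvShrink p k) p0).toList := by
  induction xs generalizing p0 with
  | nil => exact ⟨List.prefix_refl _, by simp, fun q hq _ => hq⟩
  | cons x xs ih =>
    rw [List.foldl_cons]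
    obtain ⟨iha, ihb, ihc⟩ := ih (pvShrink p0 x)
    obtain ⟨sa, sb, sc⟩ := shrink_spec p0 x
    refine ⟨iha.trans sa, ?_, ?_⟩
    · intro k hk
      rcases List.mem_cons.mp hk with rfl | hk
      · exact iha.trans sb
      · exact ihb k hk
    · intro q hqp hqall
      exact ihc q (sc q hqp (hqall x (by simp))) (fun k hk => hqall k (List.mem_cons_of_mem _ hk))

theorem foldl_prod_split (xs : List String) (p0 m0 : String) :
    xs.foldl (fun (pm : String × String) k =>
        (pvShrink pm.1 k, if PySem.Str.len k < PySem.Str.len pm.2 then k else pm.2)) (p0, m0)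
      = (xs.foldl (fun p k => pvShrink p k) p0,
         xs.foldl (fun m k => if PySem.Str.len k < PySem.Str.len m then k else m) m0) := by
  induction xs generalizing p0 m0 with
  | nil => rfl
  | cons x xs ih => rw [List.foldl_cons, List.foldl_cons, List.foldl_cons]; exact ih _ _

theorem pyGet?_zero_headI (xs : List String) (h : xs ≠ []) :
    PySem.List.pyGet? xs 0 = some xs.headI := by
  cases xs with
  | nil => exact absurd rfl h
  | cons a as => simp

-- ===== VERDICT (by name: the statement is the Claim_ definition above) =====
theorem GuessKey_spec : Claim_equal_GuessKey := by
  intro keyList _ hpre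
  unfold Spec_GuessKey
  cases keyList with
  | nil => exact absurd rfl hpre
  | cons t ts =>
    have hmap : (t :: ts).map pvRemoveImplicitSubtitle = (t :: ts).map pvStripB :=
      List.map_congr_left (fun x _ => strip_eq x)
    simp only [GuessKey, GuessKey_alt, hmap, List.map_cons]
    set k0 := pvStripB t with hk0
    set rest := ts.map pvStripB with hrest
    -- the sorted list is nonempty
    obtain ⟨h0, S', hS⟩ : ∃ a l,
        PySem.List.sorted (k0 :: rest) (fun x => PySem.Str.len x) false = a :: l := by
      cases hS : PySem.List.sorted (k0 :: rest) (fun x => PySem.Str.len x) false with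
      | nil => exact absurd ((PySem.List.sorted_eq_nil_iff _ _ _).mp hS) (by simp)
      | cons a l => exact ⟨a, l, rfl⟩
    -- head of the sorted list = the first shortest element
    have hhead : h0 = rest.foldl
        (fun m k => if PySem.Str.len k < PySem.Str.len m then k else m) k0 := by
      have h1 : (h0 :: S').headI = h0 := rfl
      rw [← h1, ← hS, PySem.List.sorted_eq_foldl_insertBy, List.foldl_cons]
      have h2 : PySem.List.insertBy
          (fun a b => decide (PySem.Str.len a < PySem.Str.len b)) k0 [] = [k0] := rfl
      rw [h2, headI_foldl_insertBy _ _ _ (by simp)]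
      simp
    have hmem := minfold_mem rest k0
    obtain ⟨pa, pb, pc⟩ := shrinkfold_spec rest k0
    rw [hS, pyGet?_zero_headI _ (by simp), foldl_prod_split]
    set m := rest.foldl (fun m k => if PySem.Str.len k < PySem.Str.len m then k else m) k0 with hm
    set p := rest.foldl (fun p k => pvShrink p k) k0 with hp
    -- all(x.startswith(m))  ↔  m = p
    have hiff : ((h0 :: S').all (fun x => PySem.Str.startswith x h0) = true) ↔ m = p := by
      rw [← hS, hhead]
      rw [List.all_eq_true]
      constructor
      · intro hall
        have hall' : ∀ x ∈ k0 :: rest, m.toList <+: x.toList := by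
          intro x hx
          have := hall x (by rw [PySem.List.mem_sorted]; exact hx)
          simpa [PySem.Chars.startswith_iff, ← hm] using this
        have hmp : m.toList <+: p.toList :=
          pc m.toList (hall' k0 (by simp)) (fun k hk => hall' k (List.mem_cons_of_mem _ hk))
        have hpm : p.toList.length ≤ m.toList.length := by
          rcases hmem with h | h
          · rw [h]
            exact pa.length_le
          · exact (pb m h).length_le
        exact String.toList_inj.mp (hmp.eq_of_length_le hpm)
      · intro hmp x hx
        rw [PySem.List.mem_sorted] at hx
        have hpx : p.toList <+: x.toList := by
          rcases List.mem_cons.mp hx with rfl | hx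
          · exact pa
          · exact pb x hx
        simp only [PySem.Str.startswith_eq, PySem.Chars.startswith_iff]
        rw [hmp]
        exact hpx
    show (if ((h0 :: S').all fun x => PySem.Str.startswith x h0) = true then h0
          else "N/A_" ++ h0)
        = if m = p then m else "N/A_" ++ m
    by_cases hcond : m = p
    · rw [if_pos (hiff.mpr hcond), if_pos hcond, hhead]
    · rw [if_neg (fun hc => hcond (hiff.mp hc)), if_neg hcond, hhead]
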